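-- pv_equiv track=rewrite | github.com/CilWB/2DdataStructure | 2D_dataStructure_L2Q1.py | sumEven
-- ===== SOURCE A (Python) =====
-- def sumEven(l,idx=0):
--     if idx < len(l) :
--         if l[idx]%2==0:
--             return l[idx] + sumEven(l,idx+1)
--         else:
--             return sumEven(l,idx+1)
--     else:
--         return 0
-- ===== SOURCE B (Python) =====
-- def sumEven(l, idx=0):
--     total = 0
--     for i in range(idx, len(l)):
--         if l[i] % 2 == 0:
--             total += l[i]
--     return total
-- ===== Notes on version B (the rewrite author's own statement) =====
-- stated objective: simpler
-- what changed: Replaced the linear recursion over indices by an iterative for-loop over range(idx, len(l)) with an explicit accumulator.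
import Mathlib
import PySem

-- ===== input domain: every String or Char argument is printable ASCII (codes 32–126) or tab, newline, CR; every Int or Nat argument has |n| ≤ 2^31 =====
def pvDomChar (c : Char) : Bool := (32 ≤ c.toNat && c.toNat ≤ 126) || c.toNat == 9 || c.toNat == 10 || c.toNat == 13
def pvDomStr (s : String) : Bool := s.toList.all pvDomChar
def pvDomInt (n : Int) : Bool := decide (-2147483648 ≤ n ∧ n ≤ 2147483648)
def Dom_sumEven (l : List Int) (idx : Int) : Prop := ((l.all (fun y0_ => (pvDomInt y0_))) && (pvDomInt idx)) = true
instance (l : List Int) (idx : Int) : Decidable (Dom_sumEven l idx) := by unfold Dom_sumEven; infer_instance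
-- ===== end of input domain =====

-- B replaces A's linear recursion by an iterative loop with an accumulator (same values, no recursion stack).

-- ===== PORT A =====
-- literal port of A's recursion; 'none' (Python IndexError, idx < -len(l)) is excluded by Pre_
def sumEven (l : List Int) (idx : Int) : Int :=
  if _h : idx < (l.length : Int) then
    match PySem.List.pyGet? l idx with
    | some v => if PySem.Int.mod v 2 = 0 then v + sumEven l (idx + 1) else sumEven l (idx + 1)
    | none => 0
  else 0
termination_by ((l.length : Int) - idx).toNat
decreasing_by omega

-- ===== PORT B =====
-- literal port of Source B: for i in range(idx, len(l)): if l[i] % 2 == 0: total += l[i]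
def sumEven_alt (l : List Int) (idx : Int) : Int :=
  (PySem.List.pyRange idx (l.length : Int) 1).foldl
    (fun total i =>
      match PySem.List.pyGet? l i with
      | some v => if PySem.Int.mod v 2 = 0 then total + v else total
      | none => total) 0

-- ===== PRECONDITION & SPEC =====
-- Pre_ excludes exactly the inputs where both Pythons raise IndexError (idx below -len(l) with idx < len(l))
def Pre_sumEven (l : List Int) (idx : Int) : Prop := -(l.length : Int) ≤ idx
instance (l : List Int) (idx : Int) : Decidable (Pre_sumEven l idx) := by unfold Pre_sumEven; infer_instance
def pvWitness_sumEven : List Int × Int := ([2, 3, 4], 0)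

def Spec_sumEven (l : List Int) (idx : Int) (out : Int) : Prop := out = sumEven_alt l idx
instance (l : List Int) (idx : Int) (out : Int) : Decidable (Spec_sumEven l idx out) := by unfold Spec_sumEven; infer_instance

-- ===== CLAIM (what is proved, stated in full; the proofs are below) =====
def Claim_equal_sumEven : Prop := ∀ (l : List Int) (idx : Int), Dom_sumEven l idx → Pre_sumEven l idx → Spec_sumEven l idx (sumEven l idx)

-- ===== LEMMAS AND PROOFS =====

-- the per-index contribution shared by both loop bodies
def pvStep (l : List Int) (i : Int) : Int :=
  match PySem.List.pyGet? l i with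
  | some v => if PySem.Int.mod v 2 = 0 then v else 0
  | none => 0

lemma alt_eq_sum (l : List Int) (idx : Int) :
    sumEven_alt l idx = ((PySem.List.pyRange idx (l.length : Int) 1).map (pvStep l)).sum := by
  unfold sumEven_alt
  have hbody : (fun (total : Int) (i : Int) =>
      match PySem.List.pyGet? l i with
      | some v => if PySem.Int.mod v 2 = 0 then total + v else total
      | none => total) = fun total i => total + pvStep l i := by
    funext total i
    unfold pvStep
    cases PySem.List.pyGet? l i with
    | none => simp
    | some v => by_cases h : (2 : Int) ∣ v <;> simp [h]
  rw [hbody, PySem.List.foldl_add]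
  simp

lemma alt_step (l : List Int) (idx : Int) (h : idx < (l.length : Int)) :
    sumEven_alt l idx = pvStep l idx + sumEven_alt l (idx + 1) := by
  rw [alt_eq_sum, alt_eq_sum, PySem.List.pyRange_one_cons h]
  simp

lemma alt_stop (l : List Int) (idx : Int) (h : ¬ idx < (l.length : Int)) :
    sumEven_alt l idx = 0 := by
  rw [alt_eq_sum, PySem.List.pyRange_one_eq_nil (by omega)]
  simp

lemma main_eq (l : List Int) (idx : Int) (hpre : -(l.length : Int) ≤ idx) :
    sumEven l idx = sumEven_alt l idx := by
  by_cases h : idx < (l.length : Int)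
  · rw [sumEven, alt_step l idx h]
    have ih := main_eq l (idx + 1) (by omega)
    unfold pvStep
    cases hg : PySem.List.pyGet? l idx with
    | none =>
        exfalso
        have hni := (PySem.List.pyGet?_eq_none_iff l idx).mp hg
        simp [PySem.Raise.InRange] at hni
        omega
    | some v =>
        by_cases hm : (2 : Int) ∣ v <;>
          simp [h, hm, ih]
  · rw [sumEven, alt_stop l idx h]
    simp [h]
termination_by ((l.length : Int) - idx).toNat
decreasing_by omega

-- ===== VERDICT (by name: the statement is the Claim_ definition above) =====
theorem sumEven_spec : Claim_equal_sumEven := by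
  intro l idx _ hpre
  exact main_eq l idx hpre
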